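-- pv_equiv track=rewrite | github.com/boutproject/zoidberg | zoidberg/smooth.py | generate_points_tosmooth
-- ===== SOURCE A (Python) =====
-- def generate_points_tosmooth(bounds, outliers, length):
--     ### for every position to be smoothed, get all points within a range surrouding that point
--     # assert len(outliers) != 0
--     if not outliers:
--         return []
--     todel = set()
--     for dup in outliers:
--         todel.update([x for x in range(dup - bounds, dup + bounds + 1) if x < length])
--     ###
--     todel = sorted(list(todel))
--     splitedlist = []
--     first = 0
--     last = todel[0]
--     for index, value in enumerate(todel[1:]):
--         if last + 1 != value:
--             splitedlist.append(todel[first : index + 1])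
--             first = index + 1
--         last = value
--     splitedlist.append(todel[first:])
--     return splitedlist
-- ===== SOURCE B (Python) =====
-- def generate_points_tosmooth(bounds, outliers, length):
--     # Merge sorted clipped intervals directly instead of materialising every point in a set.
--     if not outliers:
--         return []
--     result = []
--     cur = None
--     for d in sorted(set(outliers)):
--         lo, hi = d - bounds, min(d + bounds, length - 1)
--         if lo > hi:
--             continue
--         if cur is None:
--             cur = (lo, hi)
--         elif lo <= cur[1] + 1:
--             cur = (cur[0], max(cur[1], hi))
--         else:
--             result.append(list(range(cur[0], cur[1] + 1)))
--             cur = (lo, hi)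
--     result.append(list(range(cur[0], cur[1] + 1)))
--     return result
-- ===== Notes on version B (the rewrite author's own statement) =====
-- stated objective: faster
-- what changed: Instead of materialising every point of every outlier window in a set, sorting the set and re-splitting it into consecutive runs by an index/slice scan, B sorts the distinct outliers once and merges their clipped windows [d-bounds, min(d+bounds, length-1)] into runs directly, emitting each merged interval as a range.
import Mathlib
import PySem

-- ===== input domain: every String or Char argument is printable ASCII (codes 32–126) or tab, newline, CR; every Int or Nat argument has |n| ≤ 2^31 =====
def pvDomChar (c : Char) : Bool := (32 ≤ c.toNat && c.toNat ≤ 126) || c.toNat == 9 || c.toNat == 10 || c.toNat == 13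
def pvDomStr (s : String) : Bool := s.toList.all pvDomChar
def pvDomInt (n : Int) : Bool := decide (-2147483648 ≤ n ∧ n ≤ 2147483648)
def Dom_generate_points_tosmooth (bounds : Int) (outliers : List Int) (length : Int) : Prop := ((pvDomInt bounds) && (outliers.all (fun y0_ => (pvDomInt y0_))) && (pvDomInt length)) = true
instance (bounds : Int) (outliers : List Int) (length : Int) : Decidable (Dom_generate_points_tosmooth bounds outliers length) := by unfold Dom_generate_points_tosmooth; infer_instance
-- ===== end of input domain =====

-- B merges the sorted clipped outlier windows into runs directly instead of materialising
-- every point of every window in a set and re-splitting the sorted set (objective: faster).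

-- ===== PORT A =====
-- step of A's 'for index, value in enumerate(todel[1:])' loop; state = (splitedlist, first, last)
def stepA (T : List Int) (st : List (List Int) × Int × Int) (iv : Int × Int) :
    List (List Int) × Int × Int :=
  if st.2.2 + 1 ≠ iv.2 then
    (st.1 ++ [PySem.List.slice T (some st.2.1) (some (iv.1 + 1))], iv.1 + 1, iv.2)
  else (st.1, st.2.1, iv.2)


def generate_points_tosmooth (bounds : Int) (outliers : List Int) (length : Int) :
    List (List Int) :=
  if outliers = [] then []
  else
    let todel : PySem.Set Int :=
      outliers.foldl
        (fun s dup =>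
          PySem.Set.update s
            ((PySem.List.pyRange (dup - bounds) (dup + bounds + 1) 1).filter
              (fun x => decide (x < length))))
        PySem.Set.empty
    let todelL : List Int := PySem.List.sorted todel (fun x => x) false
    match PySem.List.pyGet? todelL 0 with
    | none => []
    | some last0 =>
      let r := (PySem.List.enumerate (PySem.List.slice todelL (some 1) none) 0).foldl
        (stepA todelL) ([], 0, last0)
      r.1 ++ [PySem.List.slice todelL (some r.2.1) none]


-- ===== PORT B =====
-- step of B's 'for d in sorted(set(outliers))' loop; state = (result, cur)
def stepB (bounds length : Int) (st : List (List Int) × Option (Int × Int)) (d : Int) :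
    List (List Int) × Option (Int × Int) :=
  let lo := d - bounds
  let hi := min (d + bounds) (length - 1)
  if hi < lo then st
  else
    match st.2 with
    | none => (st.1, some (lo, hi))
    | some c =>
      if lo ≤ c.2 + 1 then (st.1, some (c.1, max c.2 hi))
      else (st.1 ++ [PySem.List.pyRange c.1 (c.2 + 1) 1], some (lo, hi))

def finishB (st : List (List Int) × Option (Int × Int)) : List (List Int) :=
  match st.2 with
  | none => []
  | some c => st.1 ++ [PySem.List.pyRange c.1 (c.2 + 1) 1]


def generate_points_tosmooth_alt (bounds : Int) (outliers : List Int) (length : Int) :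
    List (List Int) :=
  if outliers = [] then []
  else
    finishB
      ((PySem.List.sorted (PySem.Set.ofList outliers) (fun x => x) false).foldl
        (stepB bounds length) ([], none))


-- ===== PRECONDITION & SPEC =====
-- Pre_ excludes exactly the inputs on which A raises IndexError (todel[0] on an empty
-- todel): a nonempty outlier list all of whose windows are empty (bounds < 0, or every
-- window lies entirely at or beyond `length`).  Python B also raises there (TypeError).
def Pre_generate_points_tosmooth (bounds : Int) (outliers : List Int) (length : Int) : Prop :=
  outliers = [] ∨ (0 ≤ bounds ∧ ∃ d ∈ outliers, d - bounds < length)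
instance (bounds : Int) (outliers : List Int) (length : Int) :
    Decidable (Pre_generate_points_tosmooth bounds outliers length) := by
  unfold Pre_generate_points_tosmooth; infer_instance

def pvWitness_generate_points_tosmooth : Int × List Int × Int := (1, [0, 5, 6], 10)

def Spec_generate_points_tosmooth (bounds : Int) (outliers : List Int) (length : Int)
    (out : List (List Int)) : Prop := out = generate_points_tosmooth_alt bounds outliers length
instance (bounds : Int) (outliers : List Int) (length : Int) (out : List (List Int)) :
    Decidable (Spec_generate_points_tosmooth bounds outliers length out) := by
  unfold Spec_generate_points_tosmooth; infer_instance

-- ===== CLAIM (what is proved, stated in full; the proofs are below) =====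
def Claim_equal_generate_points_tosmooth : Prop :=
  ∀ (bounds : Int) (outliers : List Int) (length : Int),
    Dom_generate_points_tosmooth bounds outliers length →
    Pre_generate_points_tosmooth bounds outliers length →
    Spec_generate_points_tosmooth bounds outliers length
      (generate_points_tosmooth bounds outliers length)

-- ===== LEMMAS AND PROOFS =====

def splitRuns : List Int → List (List Int)
  | [] => []
  | [x] => [[x]]
  | x :: y :: xs =>
    if x + 1 = y then
      match splitRuns (y :: xs) with
      | r :: rest => (x :: r) :: rest
      | [] => [[x]]
    else [x] :: splitRuns (y :: xs)

theorem splitRuns_run : ∀ (l : List Int), List.IsChain (fun a b => a + 1 = b) l → l ≠ [] →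
    splitRuns l = [l]
  | [], _, h => absurd rfl h
  | [x], _, _ => rfl
  | x :: y :: xs, h, _ => by
    rcases List.isChain_cons_cons.mp h with ⟨hxy, ht⟩
    have ih := splitRuns_run (y :: xs) ht (by simp)
    simp [splitRuns, hxy, ih]

theorem splitRuns_append_run : ∀ (l : List Int) (c v : Int) (w : List Int),
    List.IsChain (fun a b => a + 1 = b) (l ++ [c]) → c + 1 ≠ v →
    splitRuns ((l ++ [c]) ++ v :: w) = (l ++ [c]) :: splitRuns (v :: w)
  | [], c, v, w, h, hgap => by
    cases w with
    | nil => simp [splitRuns, hgap]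
    | cons b w' => simp [splitRuns, hgap]
  | x :: l', c, v, w, h, hgap => by
    cases l' with
    | nil =>
      rcases List.isChain_cons_cons.mp h with ⟨hxc, _⟩
      simp only [List.cons_append, List.nil_append]
      show splitRuns (x :: c :: v :: w) = _
      simp only [splitRuns, if_neg hgap, if_pos hxc]
    | cons z l'' =>
      rcases List.isChain_cons_cons.mp h with ⟨hxz, ht⟩
      have ih := splitRuns_append_run (z :: l'') c v w ht hgap
      have hl : l'' ++ c :: v :: w = (l'' ++ [c]) ++ v :: w := by simp
      simp only [List.cons_append] at ih ⊢
      simp only [splitRuns, if_pos hxz, ih]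

theorem chain'_pyRange (a b : Int) :
    List.IsChain (fun x y => x + 1 = y) (PySem.List.pyRange a b 1) := by
  rw [List.isChain_iff_getElem]
  intro i h
  simp only [PySem.List.length_pyRange_one] at h
  rw [PySem.List.getElem_pyRange_one, PySem.List.getElem_pyRange_one]
  push_cast; ring

theorem Aloop (T : List Int) (u : List Int) :
    ∀ (P l : List Int) (c : Int) (S : List (List Int)),
    T = P ++ (l ++ [c]) ++ u →
    List.IsChain (fun a b => a + 1 = b) (l ++ [c]) →
    ((PySem.List.enumerate u ((P.length : Int) + (l.length : Int))).foldl
        (stepA T) (S, (P.length : Int), c)).1 ++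
      [PySem.List.slice T
        (some ((PySem.List.enumerate u ((P.length : Int) + (l.length : Int))).foldl
          (stepA T) (S, (P.length : Int), c)).2.1) none]
      = S ++ splitRuns ((l ++ [c]) ++ u) := by
  induction u with
  | nil =>
    intro P l c S hT hch
    simp only [PySem.List.enumerate_nil, List.foldl_nil]
    rw [PySem.List.slice_from_natCast]
    simp only [List.append_nil]
    rw [splitRuns_run _ hch (by simp)]
    subst hT; simp
  | cons v u' ih =>
    intro P l c S hT hch
    rw [PySem.List.enumerate_cons, List.foldl_cons]
    by_cases hc : c + 1 = v
    · have hstep : stepA T (S, (P.length : Int), c) ((P.length : Int) + (l.length : Int), v)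
          = (S, (P.length : Int), v) := by simp [stepA, hc]
      rw [hstep]
      have hch' : List.IsChain (fun a b => a + 1 = b) ((l ++ [c]) ++ [v]) := by
        rw [List.isChain_append]
        refine ⟨hch, List.isChain_singleton v, ?_⟩
        intro x hx y hy
        simp at hx hy
        omega
      have harg : ((P.length : Int) + (l.length : Int)) + 1
          = (P.length : Int) + ((l ++ [c]).length : Int) := by simp; ring
      have hlist : ((l ++ [c]) ++ [v]) ++ u' = (l ++ [c]) ++ v :: u' := by simp
      have := ih P (l ++ [c]) v S (by rw [hT]; simp) hch'
      rw [hlist] at this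
      rw [harg]
      exact this
    · have hstep : stepA T (S, (P.length : Int), c) ((P.length : Int) + (l.length : Int), v)
          = (S ++ [l ++ [c]], (P.length : Int) + (l.length : Int) + 1, v) := by
        have harg2 : ((P.length : Int) + (l.length : Int)) + 1
            = (P.length : Int) + ((l.length + 1 : Nat) : Int) := by push_cast; ring
        have hsl : PySem.List.slice T (some (P.length : Int))
            (some (((P.length : Int) + (l.length : Int)) + 1)) = l ++ [c] := by
          rw [harg2, PySem.List.slice_natCast_add]
          subst hT
          rw [List.append_assoc, List.drop_left, List.take_left' (by simp)]
        simp [stepA, hc, hsl]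
      rw [hstep]
      have hPlen : (((P ++ (l ++ [c])).length : Nat) : Int)
          = (P.length : Int) + (l.length : Int) + 1 := by simp; ring
      have := ih (P ++ (l ++ [c])) [] v (S ++ [l ++ [c]])
        (by rw [hT]; simp) (List.isChain_singleton v)
      rw [hPlen] at this
      simp only [List.length_nil, Nat.cast_zero, add_zero, List.nil_append] at this
      rw [this]
      rw [splitRuns_append_run l c v u' hch hc]
      simp

def pvLo (bounds d : Int) : Int := d - bounds
def pvHi (bounds length d : Int) : Int := min (d + bounds) (length - 1)

def mergeGo (bounds length : Int) (acc : List (List Int)) (clo chi : Int) :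
    List Int → List (List Int)
  | [] => acc ++ [PySem.List.pyRange clo (chi + 1) 1]
  | d :: ds =>
    if pvLo bounds d ≤ chi + 1 then
      mergeGo bounds length acc clo (max chi (pvHi bounds length d)) ds
    else
      mergeGo bounds length (acc ++ [PySem.List.pyRange clo (chi + 1) 1])
        (pvLo bounds d) (pvHi bounds length d) ds

def uGo (bounds length : Int) (clo chi : Int) : List Int → List Int
  | [] => PySem.List.pyRange clo (chi + 1) 1
  | d :: ds =>
    if pvLo bounds d ≤ chi + 1 then
      uGo bounds length clo (max chi (pvHi bounds length d)) ds
    else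
      PySem.List.pyRange clo (chi + 1) 1 ++
        uGo bounds length (pvLo bounds d) (pvHi bounds length d) ds

def goodG (bounds length clo chi : Int) (ds : List Int) : Prop :=
  clo ≤ chi ∧ ds.Pairwise (· < ·) ∧
  ∀ d ∈ ds, clo < pvLo bounds d ∧ chi ≤ pvHi bounds length d ∧
    pvLo bounds d ≤ pvHi bounds length d

theorem pvHi_mono {bounds length d d' : Int} (h : d ≤ d') :
    pvHi bounds length d ≤ pvHi bounds length d' := by
  unfold pvHi; omega

theorem goodG_merge {bounds length clo chi d : Int} {ds : List Int}
    (h : goodG bounds length clo chi (d :: ds)) :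
    goodG bounds length clo (max chi (pvHi bounds length d)) ds := by
  obtain ⟨h1, h2, h3⟩ := h
  rw [List.pairwise_cons] at h2
  have hd := h3 d (by simp)
  refine ⟨by omega, h2.2, ?_⟩
  intro d' hd'
  have hdd' := h2.1 d' hd'
  have hmono := pvHi_mono (bounds := bounds) (length := length) (le_of_lt hdd')
  have h' := h3 d' (by simp [hd'])
  exact ⟨h'.1, by omega, h'.2.2⟩

theorem goodG_gap {bounds length clo chi d : Int} {ds : List Int}
    (h : goodG bounds length clo chi (d :: ds)) :
    goodG bounds length (pvLo bounds d) (pvHi bounds length d) ds := by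
  obtain ⟨h1, h2, h3⟩ := h
  rw [List.pairwise_cons] at h2
  refine ⟨(h3 d (by simp)).2.2, h2.2, ?_⟩
  intro d' hd'
  have hdd' := h2.1 d' hd'
  have hmono := pvHi_mono (bounds := bounds) (length := length) (le_of_lt hdd')
  have h' := h3 d' (by simp [hd'])
  refine ⟨by unfold pvLo at *; omega, by omega, h'.2.2⟩

theorem uGo_head (bounds length : Int) (ds : List Int) :
    ∀ clo chi, goodG bounds length clo chi ds →
    ∃ w, uGo bounds length clo chi ds = clo :: w := by
  induction ds with
  | nil =>
    intro clo chi hg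
    exact ⟨_, by rw [uGo]; exact PySem.List.pyRange_one_cons (by have := hg.1; omega)⟩
  | cons d ds ih =>
    intro clo chi hg
    by_cases hm : pvLo bounds d ≤ chi + 1
    · obtain ⟨w, hw⟩ := ih _ _ (goodG_merge hg)
      exact ⟨w, by rw [uGo, if_pos hm, hw]⟩
    · have h0 : uGo bounds length clo chi (d :: ds)
          = clo :: (PySem.List.pyRange (clo + 1) (chi + 1) 1 ++
              uGo bounds length (pvLo bounds d) (pvHi bounds length d) ds) := by
        rw [uGo, if_neg hm,
          PySem.List.pyRange_one_cons (show clo < chi + 1 by have := hg.1; omega)]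
        simp
      exact ⟨_, h0⟩

theorem uGo_mem (bounds length : Int) (ds : List Int) :
    ∀ clo chi, goodG bounds length clo chi ds →
    ∀ x, x ∈ uGo bounds length clo chi ds ↔
      (clo ≤ x ∧ x ≤ chi) ∨ ∃ d ∈ ds, pvLo bounds d ≤ x ∧ x ≤ pvHi bounds length d := by
  induction ds with
  | nil =>
    intro clo chi hg x
    rw [uGo, PySem.List.mem_pyRange_one]
    simp
  | cons d ds ih =>
    intro clo chi hg x
    by_cases hm : pvLo bounds d ≤ chi + 1
    · rw [uGo, if_pos hm, ih _ _ (goodG_merge hg)]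
      have hd := hg.2.2 d (by simp)
      constructor
      · rintro (h | ⟨d', hd', h⟩)
        · by_cases hx : x ≤ chi
          · exact Or.inl ⟨h.1, hx⟩
          · exact Or.inr ⟨d, by simp, by omega, by omega⟩
        · exact Or.inr ⟨d', by simp [hd'], h⟩
      · rintro (h | ⟨d', hd', h⟩)
        · exact Or.inl ⟨h.1, by omega⟩
        · rcases List.mem_cons.mp hd' with rfl | hd'
          · exact Or.inl ⟨by omega, by omega⟩
          · exact Or.inr ⟨d', hd', h⟩
    · rw [uGo, if_neg hm]
      rw [List.mem_append, PySem.List.mem_pyRange_one, ih _ _ (goodG_gap hg)]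
      constructor
      · rintro (h | h | ⟨d', hd', h⟩)
        · exact Or.inl ⟨h.1, by omega⟩
        · exact Or.inr ⟨d, by simp, h⟩
        · exact Or.inr ⟨d', by simp [hd'], h⟩
      · rintro (h | ⟨d', hd', h⟩)
        · exact Or.inl (by omega)
        · rcases List.mem_cons.mp hd' with rfl | hd'
          · exact Or.inr (Or.inl h)
          · exact Or.inr (Or.inr ⟨d', hd', h⟩)

theorem uGo_lb (bounds length : Int) (ds : List Int) (clo chi : Int)
    (hg : goodG bounds length clo chi ds) :
    ∀ x ∈ uGo bounds length clo chi ds, clo ≤ x := by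
  intro x hx
  rcases (uGo_mem bounds length ds clo chi hg x).mp hx with h | ⟨d, hd, h⟩
  · omega
  · have := hg.2.2 d hd; omega

theorem uGo_sorted (bounds length : Int) (ds : List Int) :
    ∀ clo chi, goodG bounds length clo chi ds →
    (uGo bounds length clo chi ds).Pairwise (· < ·) := by
  induction ds with
  | nil => intro clo chi hg; rw [uGo]; exact PySem.List.pairwise_lt_pyRange_one _ _
  | cons d ds ih =>
    intro clo chi hg
    by_cases hm : pvLo bounds d ≤ chi + 1
    · rw [uGo, if_pos hm]; exact ih _ _ (goodG_merge hg)
    · rw [uGo, if_neg hm, List.pairwise_append]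
      refine ⟨PySem.List.pairwise_lt_pyRange_one _ _, ih _ _ (goodG_gap hg), ?_⟩
      intro a ha b hb
      rw [PySem.List.mem_pyRange_one] at ha
      have hb' := uGo_lb bounds length ds _ _ (goodG_gap hg) b hb
      omega

theorem mergeGo_acc (bounds length : Int) (ds : List Int) :
    ∀ acc clo chi, mergeGo bounds length acc clo chi ds =
      acc ++ mergeGo bounds length [] clo chi ds := by
  induction ds with
  | nil => intro acc clo chi; rw [mergeGo, mergeGo]; simp
  | cons d ds ih =>
    intro acc clo chi
    rw [mergeGo, mergeGo]
    by_cases hm : pvLo bounds d ≤ chi + 1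
    · rw [if_pos hm, if_pos hm, ih]
    · rw [if_neg hm, if_neg hm, ih, ih (([] : List (List Int)) ++ _)]
      simp

theorem splitRuns_uGo (bounds length : Int) (ds : List Int) :
    ∀ clo chi, goodG bounds length clo chi ds →
    splitRuns (uGo bounds length clo chi ds) = mergeGo bounds length [] clo chi ds := by
  induction ds with
  | nil =>
    intro clo chi hg
    rw [uGo, mergeGo]
    rw [splitRuns_run _ (chain'_pyRange _ _) ?_]
    · simp
    · rw [PySem.List.pyRange_one_cons (by have := hg.1; omega)]; simp
  | cons d ds ih =>
    intro clo chi hg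
    by_cases hm : pvLo bounds d ≤ chi + 1
    · rw [uGo, if_pos hm, mergeGo, if_pos hm, ih _ _ (goodG_merge hg)]
    · rw [uGo, if_neg hm, mergeGo, if_neg hm]
      have hg' := goodG_gap hg
      obtain ⟨w, hw⟩ := uGo_head bounds length ds _ _ hg'
      have hrange : PySem.List.pyRange clo (chi + 1) 1
          = PySem.List.pyRange clo chi 1 ++ [chi] :=
        PySem.List.pyRange_one_succ_right (by have := hg.1; omega)
      rw [hw, hrange]
      rw [splitRuns_append_run _ _ _ _ (by rw [← hrange]; exact chain'_pyRange _ _)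
        (by omega)]
      rw [← hw, ih _ _ hg', ← hrange]
      simp only [List.nil_append]
      rw [mergeGo_acc bounds length ds [PySem.List.pyRange clo (chi + 1) 1]]
      simp

theorem foldB_skip (bounds length : Int) (ds : List Int)
    (h : ∀ d ∈ ds, pvHi bounds length d < pvLo bounds d) :
    ∀ st, ds.foldl (stepB bounds length) st = st := by
  induction ds with
  | nil => intro st; rfl
  | cons d ds ih =>
    intro st
    have hd := h d (by simp)
    unfold pvLo pvHi at hd
    rw [List.foldl_cons]
    have hstep : stepB bounds length st d = st := by
      unfold stepB; simp only [if_pos hd]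
    rw [hstep]
    exact ih (fun d' hd' => h d' (by simp [hd'])) st

theorem foldB_merge (bounds length : Int) (ds : List Int)
    (h : ∀ d ∈ ds, pvLo bounds d ≤ pvHi bounds length d) :
    ∀ acc clo chi, finishB (ds.foldl (stepB bounds length) (acc, some (clo, chi))) =
      mergeGo bounds length acc clo chi ds := by
  induction ds with
  | nil => intro acc clo chi; rfl
  | cons d ds ih =>
    intro acc clo chi
    have hd := h d (by simp)
    have hd' : ¬ (min (d + bounds) (length - 1) < d - bounds) := by
      unfold pvLo pvHi at hd; omega
    have ih' := ih (fun d' hd' => h d' (by simp [hd']))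
    rw [List.foldl_cons, mergeGo]
    by_cases hm : pvLo bounds d ≤ chi + 1
    · have hstep : stepB bounds length (acc, some (clo, chi)) d
          = (acc, some (clo, max chi (pvHi bounds length d))) := by
        unfold stepB pvLo pvHi at *
        simp only [if_neg hd']
        simp [hm]
      rw [hstep, if_pos hm, ih']
    · have hstep : stepB bounds length (acc, some (clo, chi)) d
          = (acc ++ [PySem.List.pyRange clo (chi + 1) 1],
             some (pvLo bounds d, pvHi bounds length d)) := by
        unfold stepB pvLo pvHi at *
        simp only [if_neg hd']
        simp [hm]
      rw [hstep, if_neg hm, ih']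

theorem foldl_update_eq_ofList (f : Int → List Int) (l : List Int) :
    ∀ s : PySem.Set Int,
      l.foldl (fun s d => PySem.Set.update s (f d)) s =
        (l.flatMap f).foldl PySem.Set.add s := by
  induction l with
  | nil => intro s; rfl
  | cons d l ih =>
    intro s
    rw [List.foldl_cons, List.flatMap_cons, List.foldl_append, ih]
    rfl

theorem main_equal (bounds : Int) (outliers : List Int) (length : Int)
    (hPre : outliers = [] ∨ (0 ≤ bounds ∧ ∃ d ∈ outliers, d - bounds < length)) :
    generate_points_tosmooth bounds outliers length
      = generate_points_tosmooth_alt bounds outliers length := by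
  by_cases hout : outliers = []
  · simp [generate_points_tosmooth, generate_points_tosmooth_alt, hout]
  rcases hPre with h0 | ⟨hb, d0', hd0'mem, hd0'⟩
  · exact absurd h0 hout
  -- the window of an outlier d, as A materialises it
  set f : Int → List Int := fun dup =>
    (PySem.List.pyRange (dup - bounds) (dup + bounds + 1) 1).filter
      (fun x => decide (x < length)) with hf
  have hfmem : ∀ d x, x ∈ f d ↔
      pvLo bounds d ≤ x ∧ x ≤ pvHi bounds length d := by
    intro d x
    rw [hf]
    simp only [List.mem_filter, PySem.List.mem_pyRange_one, decide_eq_true_eq]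
    unfold pvLo pvHi
    omega
  -- the sorted deduplicated outliers and their split into nonempty/empty windows
  set S : List Int := PySem.List.sorted (PySem.Set.ofList outliers) (fun x => x) false
    with hS
  have hSmem : ∀ x, x ∈ S ↔ x ∈ outliers := by
    intro x
    rw [hS, PySem.List.mem_sorted, PySem.Set.mem_ofList]
  have hSpw : S.Pairwise (· < ·) := PySem.List.sorted_ofList_pairwise_lt outliers
  set p : Int → Bool := fun d =>
    decide (pvLo bounds d ≤ pvHi bounds length d) with hp
  set S1 : List Int := S.takeWhile p with hS1
  set S2 : List Int := S.dropWhile p with hS2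
  have hsplit : S1 ++ S2 = S := List.takeWhile_append_dropWhile
  have h1 : ∀ d ∈ S1, pvLo bounds d ≤ pvHi bounds length d := by
    intro d hd
    have := List.mem_takeWhile_imp hd
    rw [hp] at this
    simpa using this
  have h2 : ∀ d ∈ S2, pvHi bounds length d < pvLo bounds d := by
    intro d hd
    cases hS2c : S2 with
    | nil => rw [hS2c] at hd; simp at hd
    | cons h t =>
      have hh : ¬ p h = true := by
        have := List.head?_dropWhile_not p S
        rw [← hS2, hS2c] at this
        simpa using this
      rw [hp] at hh
      simp only [decide_eq_true_eq, not_le] at hh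
      have hpwS2 : S2.Pairwise (· < ·) :=
        List.Pairwise.sublist (List.dropWhile_sublist p) hSpw
      rw [hS2c] at hd hpwS2
      rcases List.mem_cons.mp hd with rfl | hd'
      · exact hh
      · have hlt : h < d := (List.pairwise_cons.mp hpwS2).1 d hd'
        unfold pvLo pvHi at *
        omega
  have hS1ne : S1 ≠ [] := by
    intro hnil
    have hd0S : d0' ∈ S := (hSmem d0').mpr hd0'mem
    rw [← hsplit, hnil, List.nil_append] at hd0S
    have := h2 d0' hd0S
    unfold pvLo pvHi at this
    omega
  obtain ⟨d0, S1', hS1c⟩ : ∃ d0 S1', S1 = d0 :: S1' := by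
    cases hc : S1 with
    | nil => exact absurd hc hS1ne
    | cons a b => exact ⟨a, b, rfl⟩
  have hd0 : pvLo bounds d0 ≤ pvHi bounds length d0 := h1 d0 (by rw [hS1c]; simp)
  have hS1pw : S1.Pairwise (· < ·) := List.Pairwise.sublist (List.takeWhile_sublist p) hSpw
  have hgood : goodG bounds length (pvLo bounds d0) (pvHi bounds length d0) S1' := by
    rw [hS1c] at hS1pw
    rw [List.pairwise_cons] at hS1pw
    refine ⟨hd0, hS1pw.2, ?_⟩
    intro d hd
    have hlt : d0 < d := hS1pw.1 d hd
    have hmono := pvHi_mono (bounds := bounds) (length := length) (le_of_lt hlt)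
    have hne := h1 d (by rw [hS1c]; simp [hd])
    exact ⟨by unfold pvLo; omega, by omega, hne⟩
  -- B reduces to the interval merge
  have hB : generate_points_tosmooth_alt bounds outliers length
      = mergeGo bounds length [] (pvLo bounds d0) (pvHi bounds length d0) S1' := by
    unfold generate_points_tosmooth_alt
    rw [if_neg hout, ← hS, ← hsplit, List.foldl_append, hS1c, List.foldl_cons]
    have hstep : stepB bounds length ([], none) d0
        = ([], some (pvLo bounds d0, pvHi bounds length d0)) := by
      unfold stepB
      unfold pvLo pvHi at hd0
      simp only [if_neg (by omega : ¬ (min (d0 + bounds) (length - 1) < d0 - bounds))]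
      rfl
    rw [hstep, foldB_skip bounds length S2 h2,
      foldB_merge bounds length S1' (fun d hd => h1 d (by rw [hS1c]; simp [hd]))]
  -- A's point set is the sorted union of the windows
  set U : List Int :=
    uGo bounds length (pvLo bounds d0) (pvHi bounds length d0) S1' with hU
  have hUpw : U.Pairwise (· < ·) := uGo_sorted bounds length S1' _ _ hgood
  have hUnd : U.Nodup := hUpw.imp (fun h => ne_of_lt h)
  have hmemTU : ∀ x, x ∈ PySem.Set.ofList (outliers.flatMap f) ↔ x ∈ U := by
    intro x
    rw [PySem.Set.mem_ofList, List.mem_flatMap,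
      uGo_mem bounds length S1' _ _ hgood x]
    constructor
    · rintro ⟨d, hdmem, hdx⟩
      rw [hfmem] at hdx
      have hdS : d ∈ S := (hSmem d).mpr hdmem
      rw [← hsplit, List.mem_append] at hdS
      rcases hdS with hdS1 | hdS2
      · rw [hS1c] at hdS1
        rcases List.mem_cons.mp hdS1 with rfl | hdS1'
        · exact Or.inl hdx
        · exact Or.inr ⟨d, hdS1', hdx⟩
      · have := h2 d hdS2; omega
    · rintro (hx | ⟨d, hd, hx⟩)
      · refine ⟨d0, ?_, (hfmem d0 x).mpr hx⟩
        exact (hSmem d0).mp (by rw [← hsplit, hS1c]; simp)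
      · refine ⟨d, ?_, (hfmem d x).mpr hx⟩
        exact (hSmem d).mp (by rw [← hsplit, hS1c]; simp [hd])
  have hTeq : PySem.List.sorted (PySem.Set.ofList (outliers.flatMap f))
      (fun x => x) false = U := by
    apply PySem.List.sorted_eq_of_perm_of_pairwise_lt
    · exact (List.perm_ext_iff_of_nodup hUnd (PySem.Set.nodup_ofList _)).mpr
        (fun a => (hmemTU a).symm)
    · exact hUpw
  obtain ⟨w, hw⟩ := uGo_head bounds length S1' _ _ hgood
  rw [← hU] at hw
  -- A reduces to splitRuns of that sorted union
  have hA : generate_points_tosmooth bounds outliers length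
      = splitRuns (pvLo bounds d0 :: w) := by
    unfold generate_points_tosmooth
    rw [if_neg hout]
    simp only []
    rw [foldl_update_eq_ofList f outliers PySem.Set.empty]
    rw [show (outliers.flatMap f).foldl PySem.Set.add PySem.Set.empty
        = PySem.Set.ofList (outliers.flatMap f) from rfl]
    rw [hTeq, hw, PySem.List.pyGet?_zero_cons, PySem.List.slice_from_one]
    have haloop := Aloop (pvLo bounds d0 :: w) w [] [] (pvLo bounds d0) []
      (by simp) (List.isChain_singleton _)
    simp only [List.length_nil, Nat.cast_zero, add_zero, List.nil_append] at haloop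
    simpa using haloop
  rw [hA, hB, ← splitRuns_uGo bounds length S1' _ _ hgood, ← hU, hw]


-- ===== VERDICT (by name: the statement is the Claim_ definition above) =====
theorem generate_points_tosmooth_spec : Claim_equal_generate_points_tosmooth := by
  intro bounds outliers length _ hPre
  unfold Pre_generate_points_tosmooth at hPre
  unfold Spec_generate_points_tosmooth
  exact main_equal bounds outliers length hPre
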